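-- pv_equiv track=rewrite | github.com/SepehrQasemi/Buff-mini | src/buffmini/stage56/learning_v4.py | mutation_guidance_v4
-- ===== SOURCE A (Python) =====
-- from typing import Any
--
-- def mutation_guidance_v4(row: dict[str, Any]) -> str:
--     motifs = [str(v) for v in row.get("stage_a_failures", []) + row.get("stage_b_failures", [])]
--     if any(motif in {"REJECT::WEAK_TRIGGER", "REJECT::NO_SIGNAL"} for motif in motifs):
--         return "reshape_trigger_composition"
--     if any(motif in {"REJECT::BAD_GEOMETRY", "REJECT::BAD_RR"} for motif in motifs):
--         return "alter_geometry_and_invalidation"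
--     if any(motif in {"REJECT::COST_MARGIN_TOO_LOW", "REJECT::COST_DRAG"} for motif in motifs):
--         return "prioritize_high_edge_per_trade_setups"
--     if any(motif in {"REJECT::NO_CONFIRMATION", "REJECT::FAILED_LIQUIDITY_CONFIRMATION", "REJECT::WEAK_FLOW_CONTEXT"} for motif in motifs):
--         return "strengthen_confirmation_logic"
--     return "widen_context_and_expand_grammar"
-- ===== SOURCE B (Python) =====
-- _PRIORITY = {
--     "REJECT::WEAK_TRIGGER": 1,
--     "REJECT::NO_SIGNAL": 1,
--     "REJECT::BAD_GEOMETRY": 2,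
--     "REJECT::BAD_RR": 2,
--     "REJECT::COST_MARGIN_TOO_LOW": 3,
--     "REJECT::COST_DRAG": 3,
--     "REJECT::NO_CONFIRMATION": 4,
--     "REJECT::FAILED_LIQUIDITY_CONFIRMATION": 4,
--     "REJECT::WEAK_FLOW_CONTEXT": 4,
-- }
--
-- _GUIDANCE = {
--     1: "reshape_trigger_composition",
--     2: "alter_geometry_and_invalidation",
--     3: "prioritize_high_edge_per_trade_setups",
--     4: "strengthen_confirmation_logic",
-- }
--
-- def mutation_guidance_v4(row):
--     best = 5
--     for v in row.get("stage_a_failures", []) + row.get("stage_b_failures", []):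
--         p = _PRIORITY.get(str(v), 5)
--         if p < best:
--             best = p
--     return _GUIDANCE.get(best, "widen_context_and_expand_grammar")
-- ===== Notes on version B (the rewrite author's own statement) =====
-- stated objective: simpler
-- what changed: Replaces four priority-ordered any-scans over the motif list by a single pass that tracks the minimal priority via a motif->priority table, then one lookup in a priority->guidance table.
import Mathlib
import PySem

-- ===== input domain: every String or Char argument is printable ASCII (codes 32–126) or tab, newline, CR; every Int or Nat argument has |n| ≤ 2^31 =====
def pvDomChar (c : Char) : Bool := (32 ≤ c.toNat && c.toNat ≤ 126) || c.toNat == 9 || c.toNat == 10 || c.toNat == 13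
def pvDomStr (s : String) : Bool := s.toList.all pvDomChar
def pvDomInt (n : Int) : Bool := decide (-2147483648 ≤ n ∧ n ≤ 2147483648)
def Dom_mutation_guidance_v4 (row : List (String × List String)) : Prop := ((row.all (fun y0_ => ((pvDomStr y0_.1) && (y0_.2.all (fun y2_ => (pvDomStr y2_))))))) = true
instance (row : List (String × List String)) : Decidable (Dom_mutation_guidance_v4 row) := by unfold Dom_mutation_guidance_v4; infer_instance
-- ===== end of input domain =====

-- B replaces A's four priority-ordered scans over the motif list by one min-tracking
-- pass driven by a motif->priority table; objective: simpler. Return values only.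

-- ===== PORT A =====
def mutation_guidance_v4 (row : List (String × List String)) : String :=
  let motifs : List String :=
    (((PySem.Dict.mk row).getD "stage_a_failures" []) ++
     ((PySem.Dict.mk row).getD "stage_b_failures" [])).map (fun v => v)  -- str(v) on a str is v
  if motifs.any (fun m => m == "REJECT::WEAK_TRIGGER" || m == "REJECT::NO_SIGNAL") then
    "reshape_trigger_composition"
  else if motifs.any (fun m => m == "REJECT::BAD_GEOMETRY" || m == "REJECT::BAD_RR") then
    "alter_geometry_and_invalidation"
  else if motifs.any (fun m => m == "REJECT::COST_MARGIN_TOO_LOW" || m == "REJECT::COST_DRAG") then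
    "prioritize_high_edge_per_trade_setups"
  else if motifs.any (fun m => m == "REJECT::NO_CONFIRMATION" || m == "REJECT::FAILED_LIQUIDITY_CONFIRMATION" || m == "REJECT::WEAK_FLOW_CONTEXT") then
    "strengthen_confirmation_logic"
  else
    "widen_context_and_expand_grammar"

-- ===== PORT B =====
def pvPriority : PySem.Dict String Int := PySem.Dict.mk
  [("REJECT::WEAK_TRIGGER", 1), ("REJECT::NO_SIGNAL", 1),
   ("REJECT::BAD_GEOMETRY", 2), ("REJECT::BAD_RR", 2),
   ("REJECT::COST_MARGIN_TOO_LOW", 3), ("REJECT::COST_DRAG", 3),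
   ("REJECT::NO_CONFIRMATION", 4), ("REJECT::FAILED_LIQUIDITY_CONFIRMATION", 4),
   ("REJECT::WEAK_FLOW_CONTEXT", 4)]

def pvGuidance : PySem.Dict Int String := PySem.Dict.mk
  [(1, "reshape_trigger_composition"), (2, "alter_geometry_and_invalidation"),
   (3, "prioritize_high_edge_per_trade_setups"), (4, "strengthen_confirmation_logic")]

def mutation_guidance_v4_alt (row : List (String × List String)) : String :=
  let best : Int :=
    (((PySem.Dict.mk row).getD "stage_a_failures" []) ++
     ((PySem.Dict.mk row).getD "stage_b_failures" [])).foldl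
      (fun best v =>
        let p := pvPriority.getD v 5  -- str(v) on a str is v
        if p < best then p else best) 5
  pvGuidance.getD best "widen_context_and_expand_grammar"

-- ===== PRECONDITION & SPEC =====
def Spec_mutation_guidance_v4 (row : List (String × List String)) (out : String) : Prop := out = mutation_guidance_v4_alt row
instance (row : List (String × List String)) (out : String) : Decidable (Spec_mutation_guidance_v4 row out) := by unfold Spec_mutation_guidance_v4; infer_instance

-- ===== CLAIM (what is proved, stated in full; the proofs are below) =====
def Claim_equal_mutation_guidance_v4 : Prop := ∀ (row : List (String × List String)), Dom_mutation_guidance_v4 row → Spec_mutation_guidance_v4 row (mutation_guidance_v4 row)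

-- ===== LEMMAS AND PROOFS =====

-- the minimal priority of a motif list, foldr form
def pvMr (ms : List String) : Int := ms.foldr (fun v r => min (pvPriority.getD v 5) r) 5

lemma pvPrio_bounds (m : String) : 1 ≤ pvPriority.getD m 5 ∧ pvPriority.getD m 5 ≤ 5 := by
  simp only [pvPriority, PySem.Dict.getD_eq_get?_getD, PySem.Dict.get?_mk_cons]
  split_ifs <;> simp [PySem.Dict.get?]

lemma pvMr_bounds (ms : List String) : 1 ≤ pvMr ms ∧ pvMr ms ≤ 5 := by
  induction ms with
  | nil => simp [pvMr]
  | cons m t ih =>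
    have h := pvPrio_bounds m
    simp only [pvMr, List.foldr_cons] at *
    omega

lemma pvFoldl_eq_min (ms : List String) (b : Int) (hb : b ≤ 5) :
    ms.foldl (fun best v => if pvPriority.getD v 5 < best then pvPriority.getD v 5 else best) b
      = min b (pvMr ms) := by
  induction ms generalizing b with
  | nil => simp [pvMr]; omega
  | cons m t ih =>
    have h := pvPrio_bounds m
    simp only [List.foldl_cons, pvMr, List.foldr_cons] at *
    have : (if pvPriority.getD m 5 < b then pvPriority.getD m 5 else b) = min b (pvPriority.getD m 5) := by omega
    rw [this, ih (min b (pvPriority.getD m 5)) (by omega)]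
    omega

lemma pvMr_le_iff (ms : List String) (k : Int) (hk : k < 5) :
    pvMr ms ≤ k ↔ ∃ v ∈ ms, pvPriority.getD v 5 ≤ k := by
  induction ms with
  | nil => simp [pvMr]; omega
  | cons m t ih =>
    simp only [pvMr, List.foldr_cons, min_le_iff, List.mem_cons] at *
    constructor
    · rintro (h | h)
      · exact ⟨m, Or.inl rfl, h⟩
      · obtain ⟨v, hv, hvk⟩ := ih.mp h; exact ⟨v, Or.inr hv, hvk⟩
    · rintro ⟨v, (rfl | hv), hvk⟩
      · exact Or.inl hvk
      · exact Or.inr (ih.mpr ⟨v, hv, hvk⟩)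

-- each of A's membership predicates tests exactly "priority = i"
set_option maxRecDepth 8192 in
lemma pvQ1 (m : String) : ((m == "REJECT::WEAK_TRIGGER" || m == "REJECT::NO_SIGNAL") = true) ↔ pvPriority.getD m 5 = 1 := by
  simp only [pvPriority, PySem.Dict.getD_eq_get?_getD, PySem.Dict.get?_mk_cons]
  split_ifs <;> simp_all [PySem.Dict.get?] <;> aesop

set_option maxRecDepth 8192 in
lemma pvQ2 (m : String) : ((m == "REJECT::BAD_GEOMETRY" || m == "REJECT::BAD_RR") = true) ↔ pvPriority.getD m 5 = 2 := by
  simp only [pvPriority, PySem.Dict.getD_eq_get?_getD, PySem.Dict.get?_mk_cons]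
  split_ifs <;> simp_all [PySem.Dict.get?] <;> aesop

set_option maxRecDepth 8192 in
lemma pvQ3 (m : String) : ((m == "REJECT::COST_MARGIN_TOO_LOW" || m == "REJECT::COST_DRAG") = true) ↔ pvPriority.getD m 5 = 3 := by
  simp only [pvPriority, PySem.Dict.getD_eq_get?_getD, PySem.Dict.get?_mk_cons]
  split_ifs <;> simp_all [PySem.Dict.get?] <;> aesop

set_option maxRecDepth 8192 in
lemma pvQ4 (m : String) : ((m == "REJECT::NO_CONFIRMATION" || m == "REJECT::FAILED_LIQUIDITY_CONFIRMATION" || m == "REJECT::WEAK_FLOW_CONTEXT") = true) ↔ pvPriority.getD m 5 = 4 := by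
  simp only [pvPriority, PySem.Dict.getD_eq_get?_getD, PySem.Dict.get?_mk_cons]
  split_ifs <;> simp_all [PySem.Dict.get?] <;> aesop

lemma pvMr_eq_of (ms : List String) (k : Int) (h1 : 1 ≤ k) (hk : k < 5)
    (hex : ∃ v ∈ ms, pvPriority.getD v 5 = k)
    (hno : ∀ j : Int, 1 ≤ j → j < k → ¬ ∃ v ∈ ms, pvPriority.getD v 5 = j) :
    pvMr ms = k := by
  have hle : pvMr ms ≤ k := (pvMr_le_iff ms k hk).mpr (by obtain ⟨v, hv, he⟩ := hex; exact ⟨v, hv, le_of_eq he⟩)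
  by_contra hne
  have hlt : pvMr ms ≤ k - 1 := by omega
  obtain ⟨v, hv, hvk⟩ := (pvMr_le_iff ms (k-1) (by omega)).mp hlt
  have hb := pvPrio_bounds v
  exact hno (pvPriority.getD v 5) hb.1 (by omega) ⟨v, hv, rfl⟩

-- ===== VERDICT (by name: the statement is the Claim_ definition above) =====
lemma pvMain (ms : List String) :
    (if ms.any (fun m => m == "REJECT::WEAK_TRIGGER" || m == "REJECT::NO_SIGNAL") then
      "reshape_trigger_composition"
    else if ms.any (fun m => m == "REJECT::BAD_GEOMETRY" || m == "REJECT::BAD_RR") then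
      "alter_geometry_and_invalidation"
    else if ms.any (fun m => m == "REJECT::COST_MARGIN_TOO_LOW" || m == "REJECT::COST_DRAG") then
      "prioritize_high_edge_per_trade_setups"
    else if ms.any (fun m => m == "REJECT::NO_CONFIRMATION" || m == "REJECT::FAILED_LIQUIDITY_CONFIRMATION" || m == "REJECT::WEAK_FLOW_CONTEXT") then
      "strengthen_confirmation_logic"
    else
      "widen_context_and_expand_grammar")
    = pvGuidance.getD
        (ms.foldl (fun best v => if pvPriority.getD v 5 < best then pvPriority.getD v 5 else best) 5)
        "widen_context_and_expand_grammar" := by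
  have e1 : (ms.any (fun m => m == "REJECT::WEAK_TRIGGER" || m == "REJECT::NO_SIGNAL") = true)
      ↔ ∃ v ∈ ms, pvPriority.getD v 5 = 1 := by
    simp only [List.any_eq_true]
    exact exists_congr fun v => and_congr_right fun _ => pvQ1 v
  have e2 : (ms.any (fun m => m == "REJECT::BAD_GEOMETRY" || m == "REJECT::BAD_RR") = true)
      ↔ ∃ v ∈ ms, pvPriority.getD v 5 = 2 := by
    simp only [List.any_eq_true]
    exact exists_congr fun v => and_congr_right fun _ => pvQ2 v
  have e3 : (ms.any (fun m => m == "REJECT::COST_MARGIN_TOO_LOW" || m == "REJECT::COST_DRAG") = true)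
      ↔ ∃ v ∈ ms, pvPriority.getD v 5 = 3 := by
    simp only [List.any_eq_true]
    exact exists_congr fun v => and_congr_right fun _ => pvQ3 v
  have e4 : (ms.any (fun m => m == "REJECT::NO_CONFIRMATION" || m == "REJECT::FAILED_LIQUIDITY_CONFIRMATION" || m == "REJECT::WEAK_FLOW_CONTEXT") = true)
      ↔ ∃ v ∈ ms, pvPriority.getD v 5 = 4 := by
    simp only [List.any_eq_true]
    exact exists_congr fun v => and_congr_right fun _ => pvQ4 v
  rw [pvFoldl_eq_min ms 5 le_rfl]
  have hb := pvMr_bounds ms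
  have hmin : min 5 (pvMr ms) = pvMr ms := by omega
  rw [hmin]
  have hno1 : ¬ (ms.any (fun m => m == "REJECT::WEAK_TRIGGER" || m == "REJECT::NO_SIGNAL") = true)
      → ¬ ∃ v ∈ ms, pvPriority.getD v 5 = 1 := fun h he => h (e1.mpr he)
  by_cases h1 : ms.any (fun m => m == "REJECT::WEAK_TRIGGER" || m == "REJECT::NO_SIGNAL") = true
  · have hm : pvMr ms = 1 := pvMr_eq_of ms 1 (by omega) (by omega) (e1.mp h1)
      (fun j hj1 hj2 _ => by omega)
    rw [hm]; simp [h1]; rfl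
  · by_cases h2 : ms.any (fun m => m == "REJECT::BAD_GEOMETRY" || m == "REJECT::BAD_RR") = true
    · have hm : pvMr ms = 2 := pvMr_eq_of ms 2 (by omega) (by omega) (e2.mp h2)
        (fun j hj1 hj2 he => by
          have : j = 1 := by omega
          subst this; exact h1 (e1.mpr he))
      rw [hm]; simp [h1, h2]; rfl
    · by_cases h3 : ms.any (fun m => m == "REJECT::COST_MARGIN_TOO_LOW" || m == "REJECT::COST_DRAG") = true
      · have hm : pvMr ms = 3 := pvMr_eq_of ms 3 (by omega) (by omega) (e3.mp h3)
          (fun j hj1 hj2 he => by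
            have : j = 1 ∨ j = 2 := by omega
            rcases this with rfl | rfl
            · exact h1 (e1.mpr he)
            · exact h2 (e2.mpr he))
        rw [hm]; simp [h1, h2, h3]; rfl
      · by_cases h4 : ms.any (fun m => m == "REJECT::NO_CONFIRMATION" || m == "REJECT::FAILED_LIQUIDITY_CONFIRMATION" || m == "REJECT::WEAK_FLOW_CONTEXT") = true
        · have hm : pvMr ms = 4 := pvMr_eq_of ms 4 (by omega) (by omega) (e4.mp h4)
            (fun j hj1 hj2 he => by
              have : j = 1 ∨ j = 2 ∨ j = 3 := by omega
              rcases this with rfl | rfl | rfl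
              · exact h1 (e1.mpr he)
              · exact h2 (e2.mpr he)
              · exact h3 (e3.mpr he))
          rw [hm]; simp [h1, h2, h3, h4]; rfl
        · have hm : pvMr ms = 5 := by
            by_contra hne
            have hle : pvMr ms ≤ 4 := by omega
            obtain ⟨v, hv, hvk⟩ := (pvMr_le_iff ms 4 (by omega)).mp hle
            have hpb := pvPrio_bounds v
            have : pvPriority.getD v 5 = 1 ∨ pvPriority.getD v 5 = 2 ∨
                pvPriority.getD v 5 = 3 ∨ pvPriority.getD v 5 = 4 := by omega
            rcases this with hq | hq | hq | hq
            · exact h1 (e1.mpr ⟨v, hv, hq⟩)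
            · exact h2 (e2.mpr ⟨v, hv, hq⟩)
            · exact h3 (e3.mpr ⟨v, hv, hq⟩)
            · exact h4 (e4.mpr ⟨v, hv, hq⟩)
          rw [hm]; simp [h1, h2, h3, h4]; rfl

-- ===== VERDICT (by name: the statement is the Claim_ definition above) =====
theorem mutation_guidance_v4_spec : Claim_equal_mutation_guidance_v4 := by
  intro row _
  unfold Spec_mutation_guidance_v4
  simp only [mutation_guidance_v4, mutation_guidance_v4_alt, List.map_id']
  exact pvMain _
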